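-- pv_equiv track=rewrite | github.com/mariiahorbova/SEP-Python-Software-Engineer | statements_and_syntax/tasks_21-30.py | found_three
-- ===== SOURCE A (Python) =====
-- def found_three(arr):
--     found = False
--     i = 0
--     while i < len(arr):
--         if arr[i] == 2:
--             found = True
--         if found and arr[i] == 3:
--             return True
--         i += 1
--     return False
-- ===== SOURCE B (Python) =====
-- def found_three(arr):
--     twos = [i for i, x in enumerate(arr) if x == 2]
--     threes = [i for i, x in enumerate(arr) if x == 3]
--     return bool(twos) and bool(threes) and twos[0] < threes[-1]
-- ===== Notes on version B (the rewrite author's own statement) =====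
-- stated objective: alternative
-- what changed: Instead of a stateful early-returning scan with a 'found' flag, B collects the index lists of all 2s and all 3s and decides by comparing the first 2-index with the last 3-index.
import Mathlib
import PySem

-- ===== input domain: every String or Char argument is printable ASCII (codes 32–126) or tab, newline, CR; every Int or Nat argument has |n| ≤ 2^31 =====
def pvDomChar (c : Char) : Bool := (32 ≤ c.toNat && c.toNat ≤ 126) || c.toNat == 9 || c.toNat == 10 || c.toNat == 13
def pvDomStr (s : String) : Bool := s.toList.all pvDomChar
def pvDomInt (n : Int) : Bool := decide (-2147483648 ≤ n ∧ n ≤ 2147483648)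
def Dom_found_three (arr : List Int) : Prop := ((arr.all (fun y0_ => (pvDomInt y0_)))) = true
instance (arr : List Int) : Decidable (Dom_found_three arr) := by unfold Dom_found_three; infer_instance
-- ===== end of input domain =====

-- B replaces A's flag-carrying early-return scan by an index computation: collect the
-- indices of all 2s and all 3s and compare first-2-index with last-3-index (objective: alternative).

-- ===== PORT A =====
-- A's while-loop over index i carrying the boolean `found`, as structural recursion on the list.
def found_three_loop (found : Bool) (arr : List Int) : Bool :=
  match arr with
  | [] => false
  | x :: xs =>
    let found' := if x == 2 then true else found
    if found' && x == 3 then true else found_three_loop found' xs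

def found_three (arr : List Int) : Bool := found_three_loop false arr

-- ===== PORT B =====
-- B: the two index comprehensions, then the guarded comparison twos[0] < threes[-1]
-- (twos[0] / threes[-1] are only read after the non-emptiness guards, so headD/getLastD are exact).
def found_three_alt (arr : List Int) : Bool :=
  let twos := ((PySem.List.enumerate arr).filter (fun p => p.2 == 2)).map Prod.fst
  let threes := ((PySem.List.enumerate arr).filter (fun p => p.2 == 3)).map Prod.fst
  !twos.isEmpty && !threes.isEmpty && decide (twos.headD 0 < threes.getLastD 0)

-- ===== PRECONDITION & SPEC =====
def Spec_found_three (arr : List Int) (out : Bool) : Prop := out = found_three_alt arr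
instance (arr : List Int) (out : Bool) : Decidable (Spec_found_three arr out) := by unfold Spec_found_three; infer_instance

-- ===== CLAIM (what is proved, stated in full; the proofs are below) =====
def Claim_equal_found_three : Prop := ∀ (arr : List Int), Dom_found_three arr → Spec_found_three arr (found_three arr)

-- ===== LEMMAS AND PROOFS =====

-- middle spec: after the first 2, does a 3 occur?
def ftMid (arr : List Int) : Bool :=
  match arr with
  | [] => false
  | x :: xs => if x == 2 then xs.contains 3 else ftMid xs

-- indices (from start s) of elements equal to c
def ftSel (c s : Int) (arr : List Int) : List Int :=
  ((PySem.List.enumerate arr s).filter (fun p => p.2 == c)).map Prod.fst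

theorem ftSel_cons (c s x : Int) (xs : List Int) :
    ftSel c s (x :: xs) = (if x == c then [s] else []) ++ ftSel c (s + 1) xs := by
  by_cases h : x = c <;> simp [ftSel, PySem.List.enumerate_cons, h]

theorem ftSel_ge (c s : Int) (xs : List Int) : ∀ y ∈ ftSel c s xs, s ≤ y := by
  induction xs generalizing s with
  | nil => simp [ftSel]
  | cons x xs ih =>
    intro y hy
    rw [ftSel_cons] at hy
    rcases List.mem_append.1 hy with h | h
    · split at h <;> simp_all
    · have := ih (s + 1) y h; omega

theorem ftSel_isEmpty (c s : Int) (xs : List Int) :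
    (ftSel c s xs).isEmpty = !xs.contains c := by
  induction xs generalizing s with
  | nil => simp [ftSel]
  | cons x xs ih =>
    rw [ftSel_cons]
    by_cases h : x = c
    · subst h; simp
    · have hcx : ¬ c = x := by omega
      simp [h, hcx, ih]

-- B's comparison with a general enumerate start
def ftAltGen (s : Int) (arr : List Int) : Bool :=
  !(ftSel 2 s arr).isEmpty && !(ftSel 3 s arr).isEmpty &&
    decide ((ftSel 2 s arr).headD 0 < (ftSel 3 s arr).getLastD 0)

theorem ftAltGen_eq_mid (arr : List Int) (s : Int) : ftAltGen s arr = ftMid arr := by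
  induction arr generalizing s with
  | nil => simp [ftAltGen, ftSel, ftMid]
  | cons x xs ih =>
    by_cases h2 : x = 2
    · -- first 2 at index s; a later 3 exists iff xs contains 3, and its index exceeds s
      simp only [ftAltGen, ftSel_cons, ftMid, h2]
      rcases hre : ftSel 3 (s + 1) xs with _ | ⟨b, r⟩
      · have hne := ftSel_isEmpty 3 (s + 1) xs
        rw [hre] at hne; simp at hne
        simp [hne]
      · have hmem : (b :: r).getLastD 0 ∈ b :: r := by
          rw [List.getLastD_cons]; exact List.getLastD_mem_cons
        have hge : s + 1 ≤ (b :: r).getLastD 0 := by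
          have := ftSel_ge 3 (s + 1) xs ((b :: r).getLastD 0) (hre ▸ hmem)
          omega
        have hc := ftSel_isEmpty 3 (s + 1) xs
        rw [hre] at hc; simp at hc
        rw [List.getLastD_eq_getLast?] at hge
        simp [hc]
        omega
    · -- skip x: both index lists only shift; the comparison is unchanged
      have hx2 : ((x : Int) == 2) = false := by simp [h2]
      rw [show ftMid (x :: xs) = ftMid xs by simp [ftMid, h2]]
      rw [← ih (s + 1)]
      simp only [ftAltGen, ftSel_cons, hx2]
      by_cases h3 : x = 3
      · have hx3 : ((x : Int) == 3) = true := by simp [h3]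
        simp only [hx3, if_true, List.singleton_append]
        rcases he2 : ftSel 2 (s + 1) xs with _ | ⟨a, r2⟩
        · simp
        · rcases he3 : ftSel 3 (s + 1) xs with _ | ⟨b, r3⟩
          · -- only 3 is at index s, before every 2-index
            have hmem : a ∈ ftSel 2 (s + 1) xs := by rw [he2]; exact List.mem_cons_self
            have hge : s + 1 ≤ a := ftSel_ge _ _ _ _ hmem
            simp [List.headD, List.getLastD, show ¬ a < s by omega]
          · simp [List.headD, List.getLastD]
      · have hx3 : ((x : Int) == 3) = false := by simp; omega
        simp [hx3]

theorem found_three_loop_true (arr : List Int) :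
    found_three_loop true arr = arr.contains 3 := by
  induction arr with
  | nil => rfl
  | cons x xs ih =>
    simp only [found_three_loop]
    by_cases h3 : x = 3
    · subst h3; simp
    · have h3' : ¬ 3 = x := by omega
      by_cases h2 : x = 2 <;> simp [h2, h3, h3', ih]

theorem found_three_loop_false (arr : List Int) :
    found_three_loop false arr = ftMid arr := by
  induction arr with
  | nil => rfl
  | cons x xs ih =>
    simp only [found_three_loop, ftMid]
    by_cases h2 : x = 2
    · have h3 : ¬ x = 3 := by omega
      simp [h2, found_three_loop_true]
    · simp [h2, ih]

theorem found_three_alt_eq_mid (arr : List Int) : found_three_alt arr = ftMid arr := by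
  rw [← ftAltGen_eq_mid arr 0]; rfl

-- ===== VERDICT (by name: the statement is the Claim_ definition above) =====
theorem found_three_spec : Claim_equal_found_three := by
  intro arr _
  unfold Spec_found_three found_three
  rw [found_three_loop_false, found_three_alt_eq_mid]
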